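-- pv_equiv track=rewrite | github.com/ngroesz/exercises | codility/seat_count.py | count_number_of_contiguous_open_seats
-- ===== SOURCE A (Python) =====
-- def count_number_of_contiguous_open_seats(spaces, n):
--     number_of_contiguous_open_seats = 0
--     for row in spaces:
--         open_seat_count = 0
--         for seat in row:
--             if seat is None:
--                 open_seat_count += 1
--             else:
--                 open_seat_count = 0
--             if open_seat_count == n:
--                 number_of_contiguous_open_seats += 1
--                 open_seat_count = 0
--
--     return number_of_contiguous_open_seats
-- ===== SOURCE B (Python) =====
-- def _open_run_lengths(row):
--     """Lengths of the maximal runs of consecutive None seats in the row."""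
--     lengths = []
--     run = 0
--     for seat in row:
--         if seat is None:
--             run += 1
--         elif run:
--             lengths.append(run)
--             run = 0
--     if run:
--         lengths.append(run)
--     return lengths
--
--
-- def count_number_of_contiguous_open_seats(spaces, n):
--     if n <= 0:
--         return 0
--     total = 0
--     for row in spaces:
--         for length in _open_run_lengths(row):
--             total += length // n
--     return total
-- ===== Notes on version B (the rewrite author's own statement) =====
-- stated objective: alternative
-- what changed: B computes the lengths of maximal runs of open (None) seats per row and sums length // n, instead of A's running counter that is reset each time it reaches n.
-- intended difference: When n == 0 and at least one seat is occupied, A returns the number of occupied seats (its reset counter accidentally equals n == 0 right after every occupied seat) while B returns 0, the intended number of zero-size groups. — e.g. on count_number_of_contiguous_open_seats([[some 1]], 0): A returns 1, B returns 0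
import Mathlib
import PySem

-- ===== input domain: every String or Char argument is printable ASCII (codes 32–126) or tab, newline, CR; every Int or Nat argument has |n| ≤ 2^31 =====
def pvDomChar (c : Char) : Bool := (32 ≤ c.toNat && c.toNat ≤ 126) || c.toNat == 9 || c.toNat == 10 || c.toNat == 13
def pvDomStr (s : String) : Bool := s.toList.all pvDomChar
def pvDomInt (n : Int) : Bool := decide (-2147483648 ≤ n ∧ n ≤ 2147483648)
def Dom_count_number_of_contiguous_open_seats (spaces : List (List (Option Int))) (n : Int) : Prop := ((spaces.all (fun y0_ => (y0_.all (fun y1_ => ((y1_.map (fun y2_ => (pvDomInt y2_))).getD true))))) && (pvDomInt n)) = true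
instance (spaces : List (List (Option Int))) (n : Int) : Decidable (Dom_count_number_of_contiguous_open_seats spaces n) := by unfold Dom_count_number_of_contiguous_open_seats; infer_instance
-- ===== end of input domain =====

-- B replaces A's counter-with-reset scan by "sum length // n over maximal runs of open seats"
-- (alternative decomposition, same cost); at n == 0 with occupied seats B intentionally returns 0 where A
-- returns the number of occupied seats (see D_ below).

-- ===== PORT A =====
def aStep (n : Int) (st : Int × Int) (seat : Option Int) : Int × Int :=
  let open_seat_count : Int := match seat with
    | none => st.2 + 1
    | some _ => 0
  if open_seat_count = n then (st.1 + 1, 0) else (st.1, open_seat_count)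

def count_number_of_contiguous_open_seats (spaces : List (List (Option Int))) (n : Int) : Int :=
  spaces.foldl (fun number_of_contiguous_open_seats row =>
    (row.foldl (aStep n) (number_of_contiguous_open_seats, 0)).1) 0

-- ===== PORT B =====
def openRunsStep (st : List Int × Int) (seat : Option Int) : List Int × Int :=
  match seat with
  | none => (st.1, st.2 + 1)
  | some _ => if st.2 ≠ 0 then (st.1 ++ [st.2], 0) else st

def openRunLengths (row : List (Option Int)) : List Int :=
  let st := row.foldl openRunsStep ([], 0)
  if st.2 ≠ 0 then st.1 ++ [st.2] else st.1

def count_number_of_contiguous_open_seats_alt (spaces : List (List (Option Int))) (n : Int) : Int :=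
  if n ≤ 0 then 0
  else
    spaces.foldl (fun total row =>
      (openRunLengths row).foldl (fun t length => t + PySem.Int.floordiv length n) total) 0

-- ===== PRECONDITION & SPEC =====
-- When n == 0 and at least one seat is occupied, A returns the number of occupied seats (its reset
-- counter accidentally equals n == 0 right after every occupied seat) while B returns 0, the intended
-- number of zero-size groups.
def D_count_number_of_contiguous_open_seats (spaces : List (List (Option Int))) (n : Int) : Prop :=
  n = 0 ∧ ∃ row ∈ spaces, ∃ s ∈ row, s.isSome = true
instance (spaces : List (List (Option Int))) (n : Int) : Decidable (D_count_number_of_contiguous_open_seats spaces n) := by unfold D_count_number_of_contiguous_open_seats; infer_instance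

def Spec_count_number_of_contiguous_open_seats (spaces : List (List (Option Int))) (n : Int) (out : Int) : Prop := ¬ D_count_number_of_contiguous_open_seats spaces n → out = count_number_of_contiguous_open_seats_alt spaces n
instance (spaces : List (List (Option Int))) (n : Int) (out : Int) : Decidable (Spec_count_number_of_contiguous_open_seats spaces n out) := by unfold Spec_count_number_of_contiguous_open_seats; infer_instance

def pvDiffWitness_count_number_of_contiguous_open_seats : List (List (Option Int)) × Int := ([[some 1]], 0)
def pvDiffWitnessOut_count_number_of_contiguous_open_seats : Int × Int := (1, 0)

-- ===== CLAIM (what is proved, stated in full; the proofs are below) =====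
def Claim_unchanged_count_number_of_contiguous_open_seats : Prop := ∀ (spaces : List (List (Option Int))) (n : Int), Dom_count_number_of_contiguous_open_seats spaces n → Spec_count_number_of_contiguous_open_seats spaces n (count_number_of_contiguous_open_seats spaces n)
def Claim_changed_count_number_of_contiguous_open_seats : Prop := Dom_count_number_of_contiguous_open_seats (pvDiffWitness_count_number_of_contiguous_open_seats.1) (pvDiffWitness_count_number_of_contiguous_open_seats.2) ∧ D_count_number_of_contiguous_open_seats (pvDiffWitness_count_number_of_contiguous_open_seats.1) (pvDiffWitness_count_number_of_contiguous_open_seats.2) ∧ count_number_of_contiguous_open_seats (pvDiffWitness_count_number_of_contiguous_open_seats.1) (pvDiffWitness_count_number_of_contiguous_open_seats.2) = pvDiffWitnessOut_count_number_of_contiguous_open_seats.1 ∧ count_number_of_contiguous_open_seats_alt (pvDiffWitness_count_number_of_contiguous_open_seats.1) (pvDiffWitness_count_number_of_contiguous_open_seats.2) = pvDiffWitnessOut_count_number_of_contiguous_open_seats.2 ∧ pvDiffWitnessOut_count_number_of_contiguous_open_seats.1 ≠ pvDiffWitnessOut_count_number_of_contiguous_open_seats.2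
def Claim_exact_count_number_of_contiguous_open_seats : Prop := ∀ (spaces : List (List (Option Int))) (n : Int), Dom_count_number_of_contiguous_open_seats spaces n → D_count_number_of_contiguous_open_seats spaces n → count_number_of_contiguous_open_seats spaces n ≠ count_number_of_contiguous_open_seats_alt spaces n

-- ===== LEMMAS AND PROOFS =====

-- Common reference value: sum of run_length / n over the maximal runs of `none`s of the row,
-- with `run` open seats pending from the virtual prefix.
def fSpec (n : Int) : List (Option Int) → Int → Int
  | [], run => run / n
  | none :: t, run => fSpec n t (run + 1)
  | some _ :: t, run => run / n + fSpec n t 0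

lemma foldA_eq (n : Int) (hn : 1 ≤ n) (row : List (Option Int)) :
    ∀ (cnt run : Int), 0 ≤ run →
      (row.foldl (aStep n) (cnt, run % n)).1 = cnt + fSpec n row run - run / n := by
  induction row with
  | nil => intro cnt run _; simp [fSpec]
  | cons s t ih =>
    intro cnt run hrun
    have hn0 : (0:Int) < n := by omega
    have hq := Int.mul_ediv_add_emod run n
    have hr0 : 0 ≤ run % n := Int.emod_nonneg run (by omega)
    have hrlt : run % n < n := Int.emod_lt_of_pos run hn0
    cases s with
    | none =>
      by_cases h : run % n + 1 = n
      · have hrun1 : run + 1 = n * (run / n + 1) := by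
          rw [mul_add, mul_one]; omega
        have hdiv : (run + 1) / n = run / n + 1 := by
          rw [hrun1, Int.mul_ediv_cancel_left _ (by omega)]
        have hmod : (run + 1) % n = 0 := by
          rw [hrun1, Int.mul_emod_right]
        have step : aStep n (cnt, run % n) none = (cnt + 1, (run + 1) % n) := by
          simp [aStep, h, hmod]
        rw [List.foldl_cons, step, ih (cnt + 1) (run + 1) (by omega)]
        simp [fSpec, hdiv]; ring
      · have hpair : (run + 1) / n = run / n ∧ (run + 1) % n = run % n + 1 :=
          (Int.ediv_emod_unique hn0).mpr ⟨by omega, by omega, by omega⟩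
        have step : aStep n (cnt, run % n) none = (cnt, (run + 1) % n) := by
          simp [aStep, h, hpair.2]
        rw [List.foldl_cons, step, ih cnt (run + 1) (by omega)]
        simp [fSpec, hpair.1]
    | some v =>
      have step : aStep n (cnt, run % n) (some v) = (cnt, (0:Int) % n) := by
        simp [aStep]; omega
      rw [List.foldl_cons, step, ih cnt 0 le_rfl]
      simp [fSpec]; ring

def sdiv (n : Int) (ls : List Int) : Int := (ls.map (fun L => L / n)).sum

lemma foldB_eq (n : Int) (row : List (Option Int)) :
    ∀ (ls : List Int) (run : Int),
      sdiv n (row.foldl openRunsStep (ls, run)).1 + (row.foldl openRunsStep (ls, run)).2 / n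
        = sdiv n ls + fSpec n row run := by
  induction row with
  | nil => intro ls run; simp [fSpec]
  | cons s t ih =>
    intro ls run
    cases s with
    | none =>
      rw [List.foldl_cons]
      simpa [openRunsStep, fSpec] using ih ls (run + 1)
    | some v =>
      by_cases h : run = 0
      · rw [List.foldl_cons]
        have step : openRunsStep (ls, run) (some v) = (ls, run) := by
          simp [openRunsStep, h]
        rw [step]
        have := ih ls run
        simp [fSpec, h] at this ⊢
        omega
      · rw [List.foldl_cons]
        simp only [openRunsStep, if_pos h]
        rw [ih (ls ++ [run]) 0]
        simp [fSpec, sdiv]; ring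

lemma sdiv_openRunLengths (n : Int) (row : List (Option Int)) :
    sdiv n (openRunLengths row) = fSpec n row 0 := by
  have h := foldB_eq n row [] 0
  unfold openRunLengths
  by_cases hz : (row.foldl openRunsStep ([], 0)).2 ≠ 0
  · simp only [if_pos hz]
    simp [sdiv] at h ⊢
    omega
  · simp only [if_neg hz]
    rw [not_ne_iff] at hz
    simp [sdiv, hz] at h ⊢
    simpa using h

lemma outerA_eq (n : Int) (hn : 1 ≤ n) (spaces : List (List (Option Int))) :
    ∀ cnt : Int,
      spaces.foldl (fun acc row => (row.foldl (aStep n) (acc, 0)).1) cnt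
        = cnt + (spaces.map (fun row => fSpec n row 0)).sum := by
  induction spaces with
  | nil => intro cnt; simp
  | cons row t ih =>
    intro cnt
    have h0 : (0:Int) % n = 0 := Int.zero_emod n
    have hrow := foldA_eq n hn row cnt 0 le_rfl
    rw [h0] at hrow
    rw [List.foldl_cons, hrow, ih]
    simp
    ring

lemma outerB_eq (n : Int) (hn : 1 ≤ n) (spaces : List (List (Option Int))) :
    ∀ total : Int,
      spaces.foldl (fun total row =>
          (openRunLengths row).foldl (fun t length => t + PySem.Int.floordiv length n) total) total
        = total + (spaces.map (fun row => fSpec n row 0)).sum := by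
  induction spaces with
  | nil => intro total; simp
  | cons row t ih =>
    intro total
    have hinner : (openRunLengths row).foldl (fun t length => t + PySem.Int.floordiv length n) total
        = total + fSpec n row 0 := by
      rw [PySem.List.foldl_add]
      have : (openRunLengths row).map (fun length => PySem.Int.floordiv length n)
          = (openRunLengths row).map (fun L => L / n) := by
        apply List.map_congr_left
        intro L _
        exact PySem.Int.floordiv_eq_ediv_of_pos (by omega)
      rw [this]
      have := sdiv_openRunLengths n row
      simp [sdiv] at this
      omega
    rw [List.foldl_cons, hinner, ih]
    simp
    ring

-- n < 0, or n = 0 on an all-open row: the counter never matches n, so cnt is preserved.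
lemma foldA_const (n : Int) (row : List (Option Int))
    (hcase : n < 0 ∨ (n = 0 ∧ ∀ s ∈ row, s = none)) :
    ∀ cnt oc : Int, 0 ≤ oc →
      (row.foldl (aStep n) (cnt, oc)).1 = cnt ∧ 0 ≤ (row.foldl (aStep n) (cnt, oc)).2 := by
  induction row with
  | nil => intro cnt oc h; simpa using h
  | cons s t ih =>
    intro cnt oc hoc
    have ht : n < 0 ∨ (n = 0 ∧ ∀ x ∈ t, x = none) := by
      rcases hcase with h | ⟨h0, hall⟩
      · exact Or.inl h
      · exact Or.inr ⟨h0, fun x hx => hall x (List.mem_cons_of_mem _ hx)⟩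
    cases s with
    | none =>
      have step : aStep n (cnt, oc) none = (cnt, oc + 1) := by
        simp [aStep]
        omega
      rw [List.foldl_cons, step]
      exact ih ht cnt (oc + 1) (by omega)
    | some v =>
      have hneg : n < 0 := by
        rcases hcase with h | ⟨_, hall⟩
        · exact h
        · exact absurd (hall (some v) (List.mem_cons_self)) (by simp)
      have step : aStep n (cnt, oc) (some v) = (cnt, 0) := by
        simp [aStep]
        omega
      rw [List.foldl_cons, step]
      exact ih ht cnt 0 le_rfl

-- n = 0: A counts the occupied seats of the row.
lemma foldA_zero (row : List (Option Int)) :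
    ∀ cnt oc : Int, 0 ≤ oc →
      (row.foldl (aStep 0) (cnt, oc)).1 = cnt + (row.countP (fun s => s.isSome) : Int)
        ∧ 0 ≤ (row.foldl (aStep 0) (cnt, oc)).2 := by
  induction row with
  | nil => intro cnt oc h; simpa using h
  | cons s t ih =>
    intro cnt oc hoc
    cases s with
    | none =>
      have step : aStep 0 (cnt, oc) none = (cnt, oc + 1) := by
        simp [aStep]
        omega
      rw [List.foldl_cons, step]
      have := ih cnt (oc + 1) (by omega)
      simpa using this
    | some v =>
      have step : aStep 0 (cnt, oc) (some v) = (cnt + 1, 0) := by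
        simp [aStep]
      rw [List.foldl_cons, step]
      have := ih (cnt + 1) 0 le_rfl
      rcases this with ⟨h1, h2⟩
      refine ⟨?_, h2⟩
      rw [h1]
      simp
      ring

lemma outerA_zero (spaces : List (List (Option Int))) :
    ∀ cnt : Int,
      spaces.foldl (fun acc row => (row.foldl (aStep 0) (acc, 0)).1) cnt
        = cnt + (spaces.map (fun row => (row.countP (fun s => s.isSome) : Int))).sum := by
  induction spaces with
  | nil => intro cnt; simp
  | cons row t ih =>
    intro cnt
    rw [List.foldl_cons, (foldA_zero row cnt 0 le_rfl).1, ih]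
    simp
    ring

lemma outerA_const (n : Int) (spaces : List (List (Option Int)))
    (hcase : n < 0 ∨ (n = 0 ∧ ∀ row ∈ spaces, ∀ s ∈ row, s = none)) :
    ∀ cnt : Int,
      spaces.foldl (fun acc row => (row.foldl (aStep n) (acc, 0)).1) cnt = cnt := by
  induction spaces with
  | nil => intro cnt; simp
  | cons row t ih =>
    intro cnt
    have hrow : n < 0 ∨ (n = 0 ∧ ∀ s ∈ row, s = none) := by
      rcases hcase with h | ⟨h0, hall⟩
      · exact Or.inl h
      · exact Or.inr ⟨h0, hall row (List.mem_cons_self)⟩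
    have ht : n < 0 ∨ (n = 0 ∧ ∀ r ∈ t, ∀ s ∈ r, s = none) := by
      rcases hcase with h | ⟨h0, hall⟩
      · exact Or.inl h
      · exact Or.inr ⟨h0, fun r hr => hall r (List.mem_cons_of_mem _ hr)⟩
    rw [List.foldl_cons, (foldA_const n row hrow cnt 0 le_rfl).1]
    exact ih ht cnt

-- ===== VERDICT (by name: the statement is the Claim_ definition above) =====
theorem count_number_of_contiguous_open_seats_spec : Claim_unchanged_count_number_of_contiguous_open_seats := by
  intro spaces n _ hND
  unfold count_number_of_contiguous_open_seats count_number_of_contiguous_open_seats_alt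
  by_cases hn : n ≤ 0
  · rw [if_pos hn]
    by_cases hneg : n < 0
    · exact outerA_const n spaces (Or.inl hneg) 0
    · have hn0 : n = 0 := by omega
      subst hn0
      have hall : ∀ row ∈ spaces, ∀ s ∈ row, s = none := by
        intro row hr s hs
        by_contra hne
        exact hND ⟨rfl, row, hr, s, hs, by cases s with | none => exact absurd rfl hne | some v => rfl⟩
      exact outerA_const 0 spaces (Or.inr ⟨rfl, hall⟩) 0
  · rw [if_neg hn]
    rw [outerA_eq n (by omega) spaces 0, outerB_eq n (by omega) spaces 0]

theorem count_number_of_contiguous_open_seats_changed : Claim_changed_count_number_of_contiguous_open_seats := by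
  unfold Claim_changed_count_number_of_contiguous_open_seats; decide

theorem count_number_of_contiguous_open_seats_tight : Claim_exact_count_number_of_contiguous_open_seats := by
  intro spaces n _ hD
  rcases hD with ⟨hn0, row, hr, s, hs, hsome⟩
  subst hn0
  have hB : count_number_of_contiguous_open_seats_alt spaces 0 = 0 := by
    unfold count_number_of_contiguous_open_seats_alt
    rw [if_pos le_rfl]
  have hA : count_number_of_contiguous_open_seats spaces 0
      = (spaces.map (fun row => (row.countP (fun s => s.isSome) : Int))).sum := by
    unfold count_number_of_contiguous_open_seats
    rw [outerA_zero spaces 0]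
    ring
  have hterm : (1:Int) ≤ (row.countP (fun s => s.isSome) : Int) := by
    have : 0 < row.countP (fun x => x.isSome) := by
      rw [List.countP_pos_iff]
      exact ⟨s, hs, hsome⟩
    exact_mod_cast this
  have hsum : (1:Int) ≤ (spaces.map (fun row => (row.countP (fun s => s.isSome) : Int))).sum := by
    have hmem : (row.countP (fun s => s.isSome) : Int)
        ∈ spaces.map (fun row => (row.countP (fun s => s.isSome) : Int)) :=
      List.mem_map_of_mem hr
    have hle := List.single_le_sum (l := spaces.map (fun row => (row.countP (fun s => s.isSome) : Int)))
      (by intro x hx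
          simp only [List.mem_map] at hx
          rcases hx with ⟨r, _, rfl⟩
          positivity) _ hmem
    omega
  rw [hA, hB]
  omega
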